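-- pv_equiv track=rewrite | github.com/gs-kikim/ThisIsTheCodingTest | src/Array/Q26.py | s2
-- ===== SOURCE A (Python) =====
-- import heapq
--
-- def s2(n, data):
--     heap = []
--
--     for i in range(n):
--         heapq.heappush(heap, data[i])
--
--     result = 0
--     while len(heap) != 1:
--         one = heapq.heappop(heap)
--         two = heapq.heappop(heap)
--         sum_value = one + two
--         result += sum_value
--         heapq.heappush(heap, sum_value)
--     return result
-- ===== SOURCE B (Python) =====
-- def s2(n, data):
--     # sorted-list variant: keep the working set fully ordered, pop the two
--     # smallest from the front, reinsert the sum at its ordered position.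
--     arr = sorted(data[i] for i in range(n))
--     result = 0
--     while len(arr) != 1:
--         one = arr.pop(0)
--         two = arr.pop(0)
--         s = one + two
--         result += s
--         i = 0
--         while i < len(arr) and arr[i] <= s:
--             i += 1
--         arr.insert(i, s)
--     return result
-- ===== Notes on version B (the rewrite author's own statement) =====
-- stated objective: alternative
-- what changed: Replaces the binary heap with a fully sorted list: the two minima are popped from the front and the merged sum is reinserted at its ordered position by a linear scan, keeping a total-order invariant instead of a heap invariant.
import Mathlib
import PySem

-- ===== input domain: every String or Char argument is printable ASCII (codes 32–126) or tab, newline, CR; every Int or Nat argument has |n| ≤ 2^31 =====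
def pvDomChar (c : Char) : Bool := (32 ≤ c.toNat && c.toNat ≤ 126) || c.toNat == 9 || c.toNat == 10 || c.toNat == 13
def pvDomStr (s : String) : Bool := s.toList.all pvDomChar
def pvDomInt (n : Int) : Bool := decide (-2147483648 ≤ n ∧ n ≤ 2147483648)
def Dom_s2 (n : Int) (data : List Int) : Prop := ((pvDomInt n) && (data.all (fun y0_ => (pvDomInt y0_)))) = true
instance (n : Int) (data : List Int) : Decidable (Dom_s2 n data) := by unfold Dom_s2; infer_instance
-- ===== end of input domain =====

-- B keeps a fully sorted list (pop the two front minima, linear ordered reinsertion)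
-- instead of A's binary heap; same return value on Pre_ (1 ≤ n ≤ len(data)).


-- ===== PORT A =====
-- heapq is a library call in A; it is ported by its documented contract (exact for
-- Int elements, which are indistinguishable when equal): heappush adds the element,
-- heappop removes and returns the smallest element of the collection.
def pyHeapPush (heap : List Int) (x : Int) : List Int := heap ++ [x]

def pyHeapPop? (heap : List Int) : Option (Int × List Int) :=
  match PySem.List.min? heap (fun x => x) with
  | none => none                      -- heappop on an empty heap: IndexError
  | some m => some (m, heap.erase m)

theorem pyHeapPop?_length {l : List Int} {m : Int} {r : List Int}
    (h : pyHeapPop? l = some (m, r)) : r.length + 1 = l.length := by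
  unfold pyHeapPop? at h
  cases hm : PySem.List.min? l (fun x => x) with
  | none => rw [hm] at h; exact absurd h (by simp)
  | some x =>
    rw [hm] at h
    have hx : x ∈ l := PySem.List.min?_mem hm
    have hlp : 1 ≤ l.length := List.length_pos_of_mem hx
    have hr : l.erase x = r := congrArg Prod.snd (Option.some.inj h)
    rw [← hr, List.length_erase_of_mem hx]
    omega

def s2Loop (heap : List Int) (result : Int) : Int :=
  if heap.length ≠ 1 then
    match h1 : pyHeapPop? heap with
    | none => result                  -- Python raises IndexError here; outside Pre_s2
    | some (one, rest1) =>
      match h2 : pyHeapPop? rest1 with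
      | none => result                -- Python raises IndexError here; outside Pre_s2
      | some (two, rest2) =>
        s2Loop (pyHeapPush rest2 (one + two)) (result + (one + two))
  else result
termination_by heap.length
decreasing_by
  have e1 := pyHeapPop?_length h1
  have e2 := pyHeapPop?_length h2
  simp [pyHeapPush]
  omega

def s2 (n : Int) (data : List Int) : Int :=
  let heap := (PySem.List.pyRange 0 n 1).foldl (fun h i =>
      match PySem.List.pyGet? data i with
      | some v => pyHeapPush h v
      | none => h) ([] : List Int)    -- none = IndexError on data[i]; outside Pre_s2
  s2Loop heap 0

-- ===== PORT B =====
-- the inner scan of Source B: advance past every element ≤ s, insert s there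
def insortLinear (arr : List Int) (x : Int) : List Int :=
  match arr with
  | [] => [x]
  | y :: ys => if y ≤ x then y :: insortLinear ys x else x :: y :: ys

theorem insortLinear_perm (arr : List Int) (x : Int) :
    (insortLinear arr x).Perm (x :: arr) := by
  induction arr with
  | nil => simp [insortLinear]
  | cons y ys ih =>
    unfold insortLinear
    split
    · exact (ih.cons y).trans (List.Perm.swap x y ys)
    · exact List.Perm.refl _

theorem insortLinear_length (arr : List Int) (x : Int) :
    (insortLinear arr x).length = arr.length + 1 := by
  simpa using (insortLinear_perm arr x).length_eq

def s2AltLoop (arr : List Int) (result : Int) : Int :=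
  if arr.length ≠ 1 then
    match arr with
    | [] => result                    -- pop(0) raises IndexError; outside Pre_s2
    | [_] => result                   -- unreachable: the guard excludes length 1
    | one :: two :: rest =>
      s2AltLoop (insortLinear rest (one + two)) (result + (one + two))
  else result
termination_by arr.length
decreasing_by simp [insortLinear_length]

def s2_alt (n : Int) (data : List Int) : Int :=
  s2AltLoop (PySem.List.sorted ((PySem.List.pyRange 0 n 1).filterMap
      (fun i => PySem.List.pyGet? data i))   -- none = IndexError on data[i]; outside Pre_s2
    (fun x => x) false) 0

-- ===== PRECONDITION & SPEC =====
-- exactly the inputs on which the Python A returns: n < 1 leaves the heap empty and the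
-- first heappop raises IndexError; n > len(data) raises IndexError on data[i].
def Pre_s2 (n : Int) (data : List Int) : Prop := 1 ≤ n ∧ n ≤ (data.length : Int)
instance (n : Int) (data : List Int) : Decidable (Pre_s2 n data) := by unfold Pre_s2; infer_instance
def pvWitness_s2 : Int × List Int := (3, [5, -2, 7])

def Spec_s2 (n : Int) (data : List Int) (out : Int) : Prop := out = s2_alt n data
instance (n : Int) (data : List Int) (out : Int) : Decidable (Spec_s2 n data out) := by unfold Spec_s2; infer_instance

-- ===== CLAIM (what is proved, stated in full; the proofs are below) =====
def Claim_equal_s2 : Prop := ∀ (n : Int) (data : List Int), Dom_s2 n data → Pre_s2 n data → Spec_s2 n data (s2 n data)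

-- ===== LEMMAS AND PROOFS =====

theorem insortLinear_pairwise {arr : List Int} (x : Int) (h : arr.Pairwise (· ≤ ·)) :
    (insortLinear arr x).Pairwise (· ≤ ·) := by
  induction arr with
  | nil => simp [insortLinear]
  | cons y ys ih =>
    rw [List.pairwise_cons] at h
    obtain ⟨hy, hys⟩ := h
    unfold insortLinear
    split
    · rename_i hyx
      rw [List.pairwise_cons]
      refine ⟨?_, ih hys⟩
      intro z hz
      rcases List.mem_cons.mp ((insortLinear_perm ys x).mem_iff.mp hz) with hzx | hzys
      · subst hzx; omega
      · exact hy z hzys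
    · rename_i hyx
      rw [List.pairwise_cons]
      refine ⟨?_, by rw [List.pairwise_cons]; exact ⟨hy, hys⟩⟩
      intro z hz
      rcases List.mem_cons.mp hz with hzy | hzys
      · omega
      · have := hy z hzys; omega

-- one iteration of each loop, under the hypotheses its guard and pops satisfy
theorem s2Loop_step {heap : List Int} {one two : Int} {rest1 rest2 : List Int} (res : Int)
    (hg : heap.length ≠ 1)
    (h1 : pyHeapPop? heap = some (one, rest1)) (h2 : pyHeapPop? rest1 = some (two, rest2)) :
    s2Loop heap res = s2Loop (pyHeapPush rest2 (one + two)) (res + (one + two)) := by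
  rw [s2Loop, if_pos hg]
  split
  · rename_i heq
    rw [h1] at heq
    exact absurd heq (by simp)
  · rename_i o r1 heq
    rw [h1] at heq
    simp only [Option.some.injEq, Prod.mk.injEq] at heq
    obtain ⟨rfl, rfl⟩ := heq
    split
    · rename_i heq2
      rw [h2] at heq2
      exact absurd heq2 (by simp)
    · rename_i t r2 heq2
      rw [h2] at heq2
      simp only [Option.some.injEq, Prod.mk.injEq] at heq2
      obtain ⟨rfl, rfl⟩ := heq2
      rfl

theorem s2AltLoop_step (a b : Int) (rest : List Int) (res : Int) :
    s2AltLoop (a :: b :: rest) res = s2AltLoop (insortLinear rest (a + b)) (res + (a + b)) := by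
  rw [s2AltLoop, if_pos (by simp only [List.length_cons]; omega : (a :: b :: rest).length ≠ 1)]

-- a heap that is a permutation of a ≤-sorted nonempty list pops exactly its head
theorem pop_of_perm_sorted {heap : List Int} {a : Int} {t : List Int}
    (hperm : heap.Perm (a :: t)) (hsorted : (a :: t).Pairwise (· ≤ ·)) :
    ∃ r, pyHeapPop? heap = some (a, r) ∧ r.Perm t := by
  have hne : heap ≠ [] := by
    intro hnil; rw [hnil] at hperm
    exact absurd hperm.symm.length_eq (by simp)
  obtain ⟨m, hm⟩ : ∃ m, PySem.List.min? heap (fun x => x) = some m := by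
    cases h : PySem.List.min? heap (fun x => x) with
    | none => exact absurd ((PySem.List.min?_eq_none_iff heap (fun x => x)).mp h) hne
    | some m => exact ⟨m, rfl⟩
  have hmmem : m ∈ heap := PySem.List.min?_mem hm
  have hamem : a ∈ heap := hperm.mem_iff.mpr (by simp)
  have hma : m = a := by
    have h1 : m ≤ a := PySem.List.min?_isMin hm a hamem
    have h2 : a ≤ m := by
      have hm' : m ∈ a :: t := hperm.mem_iff.mp hmmem
      rcases List.mem_cons.mp hm' with h | h
      · omega
      · exact (List.pairwise_cons.mp hsorted).1 m h
    omega
  subst hma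
  refine ⟨heap.erase m, ?_, ?_⟩
  · unfold pyHeapPop?; rw [hm]
  · have := hperm.erase m
    simpa [List.erase_cons_head] using this

-- the two loops agree whenever the heap is a permutation of the sorted list
theorem loop_eq : ∀ (k : Nat) (arr heap : List Int) (res : Int),
    arr.length = k → heap.Perm arr → arr.Pairwise (· ≤ ·) →
    s2Loop heap res = s2AltLoop arr res := by
  intro k
  induction k using Nat.strong_induction_on with
  | _ k ih =>
    intro arr heap res hlen hperm hsorted
    match arr with
    | [] =>
      have : heap = [] := List.Perm.eq_nil hperm
      subst this
      rw [s2Loop, s2AltLoop]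
      simp [pyHeapPop?, PySem.List.min?]
    | [a] =>
      have hl : heap.length = 1 := by simpa using hperm.length_eq
      rw [s2Loop, s2AltLoop]
      simp [hl]
    | a :: b :: rest =>
      obtain ⟨r1, hpop1, hr1⟩ := pop_of_perm_sorted hperm hsorted
      have hsorted' : (b :: rest).Pairwise (· ≤ ·) := (List.pairwise_cons.mp hsorted).2
      obtain ⟨r2, hpop2, hr2⟩ := pop_of_perm_sorted hr1 hsorted'
      have hlen2 : heap.length = rest.length + 2 := by simpa using hperm.length_eq
      have hk : rest.length + 2 = k := by simpa using hlen
      rw [s2Loop_step res (by omega) hpop1 hpop2, s2AltLoop_step a b rest res]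
      have hperm' : (pyHeapPush r2 (a + b)).Perm (insortLinear rest (a + b)) := by
        have hp1 : (pyHeapPush r2 (a + b)).Perm ((a + b) :: r2) := List.perm_append_singleton _ _
        exact (hp1.trans (hr2.cons (a + b))).trans (insortLinear_perm rest (a + b)).symm
      have hsorted'' : (insortLinear rest (a + b)).Pairwise (· ≤ ·) :=
        insortLinear_pairwise (a + b) (List.pairwise_cons.mp hsorted').2
      exact ih (rest.length + 1) (by omega) _ _ _ (insortLinear_length rest (a + b)) hperm' hsorted''

-- building A's heap under Pre_: the pushes collect exactly the first n elements
theorem buildHeap_eq (data : List Int) : ∀ (m : Nat), m ≤ data.length →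
    (PySem.List.pyRange 0 (m : Int) 1).foldl (fun h i =>
      match PySem.List.pyGet? data i with
      | some v => pyHeapPush h v
      | none => h) ([] : List Int) = data.take m := by
  intro m
  induction m with
  | zero => intro _; simp [PySem.List.pyRange_one_eq_nil]
  | succ m ihm =>
    intro hm
    have hcast : ((m : Int) + 1) = ((m + 1 : Nat) : Int) := by push_cast; ring
    rw [← hcast, PySem.List.pyRange_one_succ_right (by positivity), List.foldl_append,
      ihm (by omega)]
    have hget : PySem.List.pyGet? data (m : Int) = some data[m] := by
      rw [PySem.List.pyGet?_natCast]
      exact List.getElem?_eq_getElem (by omega)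
    simp only [List.foldl_cons, List.foldl_nil, hget]
    rw [List.take_add_one, List.getElem?_eq_getElem (show m < data.length by omega)]
    rfl

-- building B's working list under Pre_: the comprehension is the first n elements
theorem buildArr_eq (data : List Int) : ∀ (m : Nat), m ≤ data.length →
    (PySem.List.pyRange 0 (m : Int) 1).filterMap (fun i => PySem.List.pyGet? data i)
      = data.take m := by
  intro m
  induction m with
  | zero => intro _; simp [PySem.List.pyRange_one_eq_nil]
  | succ m ihm =>
    intro hm
    have hcast : ((m : Int) + 1) = ((m + 1 : Nat) : Int) := by push_cast; ring
    rw [← hcast, PySem.List.pyRange_one_succ_right (by positivity), List.filterMap_append,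
      ihm (by omega)]
    have hget : PySem.List.pyGet? data (m : Int) = some data[m] := by
      rw [PySem.List.pyGet?_natCast]
      exact List.getElem?_eq_getElem (by omega)
    simp only [List.filterMap_cons, List.filterMap_nil, hget]
    rw [List.take_add_one, List.getElem?_eq_getElem (show m < data.length by omega)]
    rfl

-- ===== VERDICT (by name: the statement is the Claim_ definition above) =====
theorem s2_spec : Claim_equal_s2 := by
  intro n data _ hpre
  obtain ⟨h1, h2⟩ := hpre
  obtain ⟨m, rfl⟩ : ∃ m : Nat, n = (m : Int) := ⟨n.toNat, by omega⟩
  unfold Spec_s2 s2 s2_alt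
  rw [buildHeap_eq data m (by omega), buildArr_eq data m (by omega)]
  exact loop_eq (PySem.List.sorted (data.take m) (fun x => x) false).length _ _ 0 rfl
    (PySem.List.sorted_perm _ _ _).symm
    (PySem.List.sorted_pairwise (data.take m) (fun x => x))
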